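-- pv_equiv track=rewrite | github.com/Raheelghafoor/PythonFourWeekInternship | day13.py | check_consistency_q15
-- ===== SOURCE A (Python) =====
-- def check_consistency_q15(data):
--     seen_keys = set()
--     duplicates = []
--     missing_keys = []
--     corrupted = []
--     for key, value in data:
--         if not key:
--             missing_keys.append((key, value))
--         elif key in seen_keys:
--             duplicates.append((key, value))
--         else:
--             seen_keys.add(key)
--         if value is None or value == "":
--             corrupted.append((key, value))
--     return duplicates, missing_keys, corrupted
-- ===== SOURCE B (Python) =====
-- def check_consistency_q15(data):
--     items = list(data)
--     enum = list(enumerate(items))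
--     # hash index: first occurrence index of each truthy key (reversed build: earliest wins)
--     first = {k: i for i, (k, v) in reversed(enum) if k}
--     duplicates = [(k, v) for i, (k, v) in enum if k and first[k] != i]
--     missing_keys = [(k, v) for k, v in items if not k]
--     corrupted = [(k, v) for k, v in items if v is None or v == ""]
--     return duplicates, missing_keys, corrupted
-- ===== Notes on version B (the rewrite author's own statement) =====
-- stated objective: alternative
-- what changed: Replaces A's stateful single pass (a growing seen-set driving the duplicate branch) by a first-occurrence hash index built once from a reversed dict comprehension, so duplicates become a pure positional filter (index differs from the key's first-occurrence index), with missing and corrupted as independent comprehensions.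
import Mathlib
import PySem

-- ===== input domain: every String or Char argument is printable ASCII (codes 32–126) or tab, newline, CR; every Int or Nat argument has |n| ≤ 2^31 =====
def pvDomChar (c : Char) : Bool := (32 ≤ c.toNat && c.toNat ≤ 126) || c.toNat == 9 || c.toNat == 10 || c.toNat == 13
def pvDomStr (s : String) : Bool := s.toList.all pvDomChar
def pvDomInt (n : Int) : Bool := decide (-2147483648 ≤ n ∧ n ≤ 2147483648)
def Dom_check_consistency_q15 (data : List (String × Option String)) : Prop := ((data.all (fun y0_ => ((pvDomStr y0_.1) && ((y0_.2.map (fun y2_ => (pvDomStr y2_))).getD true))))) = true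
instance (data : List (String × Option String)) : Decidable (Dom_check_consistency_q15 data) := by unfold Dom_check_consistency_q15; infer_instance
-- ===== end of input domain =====

-- B replaces A's stateful seen-set loop by a first-occurrence hash index built once
-- (reversed dict comprehension) plus pure positional filters; objective: alternative.


-- ===== PORT A =====
-- literal transliteration of A: one fold over (seen_keys, duplicates, missing_keys, corrupted)
def pvStepA (st : PySem.Set String × List (String × Option String) × List (String × Option String) × List (String × Option String)) (kv : String × Option String) : PySem.Set String × List (String × Option String) × List (String × Option String) × List (String × Option String) :=
  let seen := st.1
  let dup := st.2.1
  let miss := st.2.2.1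
  let corr := st.2.2.2
  let key := kv.1
  let value := kv.2
  -- 'if not key: … elif key in seen_keys: … else: seen_keys.add(key)'
  let st1 : PySem.Set String × List (String × Option String) × List (String × Option String) :=
    if key = "" then (seen, dup, miss ++ [kv])
    else if seen.contains key then (seen, dup ++ [kv], miss)
    else (seen.add key, dup, miss)
  -- 'if value is None or value == "": corrupted.append(…)'
  let corr' := if value = none ∨ value = some "" then corr ++ [kv] else corr
  (st1.1, st1.2.1, st1.2.2, corr')

def check_consistency_q15 (data : List (String × Option String)) : (List (String × Option String)) × (List (String × Option String)) × (List (String × Option String)) :=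
  let st := data.foldl pvStepA (PySem.Set.ofList [], [], [], [])
  (st.2.1, st.2.2.1, st.2.2.2)

-- ===== PORT B =====
-- B's first-occurrence index: {k: i for i, (k, v) in reversed(enum) if k}
def pvFirstOcc (enum : List (Int × (String × Option String))) : PySem.Dict String Int :=
  enum.reverse.foldl (fun d p => if p.2.1 = "" then d else d.insert p.2.1 p.1) PySem.Dict.empty

def check_consistency_q15_alt (data : List (String × Option String)) : (List (String × Option String)) × (List (String × Option String)) × (List (String × Option String)) :=
  let items := data
  let enum := PySem.List.enumerate items 0
  let first := pvFirstOcc enum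
  -- 'first[k]' never raises in B: it is only read for truthy k, which is always indexed;
  -- getD's default -1 is never the value used.
  let duplicates := (enum.filter (fun p => p.2.1 ≠ "" ∧ first.getD p.2.1 (-1) ≠ p.1)).map (·.2)
  let missing_keys := items.filter (fun kv => kv.1 = "")
  let corrupted := items.filter (fun kv => kv.2 = none ∨ kv.2 = some "")
  (duplicates, missing_keys, corrupted)

-- ===== PRECONDITION & SPEC =====
def Spec_check_consistency_q15 (data : List (String × Option String)) (out : (List (String × Option String)) × (List (String × Option String)) × (List (String × Option String))) : Prop := out = check_consistency_q15_alt data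
instance (data : List (String × Option String)) (out : (List (String × Option String)) × (List (String × Option String)) × (List (String × Option String))) : Decidable (Spec_check_consistency_q15 data out) := by unfold Spec_check_consistency_q15; infer_instance

-- ===== CLAIM (what is proved, stated in full; the proofs are below) =====
def Claim_equal_check_consistency_q15 : Prop := ∀ (data : List (String × Option String)), Dom_check_consistency_q15 data → Spec_check_consistency_q15 data (check_consistency_q15 data)

-- ===== LEMMAS AND PROOFS =====

-- reference duplicates list: kv of rest is kept iff its key is truthy and occurs among the keys of the prefix so far
def pvDupRef (pre : List (String × Option String)) : List (String × Option String) → List (String × Option String)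
  | [] => []
  | kv :: rest =>
    (if kv.1 ≠ "" ∧ kv.1 ∈ pre.map Prod.fst then [kv] else []) ++ pvDupRef (pre ++ [kv]) rest

-- A's loop state (seen set) matched against the prefix keys gives pvDupRef
theorem pvA_dup_ref (rest : List (String × Option String)) :
    ∀ (pre : List (String × Option String)) (seen : PySem.Set String)
      (dup miss corr : List (String × Option String)),
      (∀ k, k ≠ "" → (seen.contains k = true ↔ k ∈ pre.map Prod.fst)) →
      (rest.foldl pvStepA (seen, dup, miss, corr)).2 =
        (dup ++ pvDupRef pre rest,
         miss ++ rest.filter (fun kv => kv.1 = ""),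
         corr ++ rest.filter (fun kv => kv.2 = none ∨ kv.2 = some "")) := by
  induction rest with
  | nil => intro pre seen dup miss corr _; simp [pvDupRef]
  | cons kv rest ih =>
    intro pre seen dup miss corr hseen
    rw [List.foldl_cons]
    by_cases hk : kv.1 = ""
    · have hmem : ¬ (kv.1 ≠ "" ∧ kv.1 ∈ pre.map Prod.fst) := by tauto
      have hinv : ∀ k, k ≠ "" → (seen.contains k = true ↔ k ∈ (pre ++ [kv]).map Prod.fst) := by
        intro k hk'
        simp only [List.map_append, List.mem_append, List.map_cons, List.map_nil,
          List.mem_singleton]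
        rw [hseen k hk']
        constructor
        · exact Or.inl
        · rintro (h | h)
          · exact h
          · exact absurd (h ▸ hk) hk'
      by_cases hv : (kv.2 = none ∨ kv.2 = some "")
      · rw [show pvStepA (seen, dup, miss, corr) kv = (seen, dup, miss ++ [kv], corr ++ [kv]) from by
            simp [pvStepA, hk, hv], ih (pre ++ [kv]) _ _ _ _ hinv]
        simp [pvDupRef, hk, hv]
      · rw [show pvStepA (seen, dup, miss, corr) kv = (seen, dup, miss ++ [kv], corr) from by
            simp [pvStepA, hk, hv], ih (pre ++ [kv]) _ _ _ _ hinv]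
        simp [pvDupRef, hk, hv]
    · by_cases hs : seen.contains kv.1 = true
      · have hs' : kv.1 ∈ seen := (PySem.Set.contains_iff _ _).1 hs
        have hmem : kv.1 ∈ pre.map Prod.fst := (hseen kv.1 hk).1 hs
        have hinv : ∀ k, k ≠ "" → (seen.contains k = true ↔ k ∈ (pre ++ [kv]).map Prod.fst) := by
          intro k hk'
          simp only [List.map_append, List.mem_append, List.map_cons, List.map_nil,
            List.mem_singleton]
          rw [hseen k hk']
          constructor
          · exact Or.inl
          · rintro (h | h)
            · exact h
            · exact h ▸ hmem
        by_cases hv : (kv.2 = none ∨ kv.2 = some "")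
        · rw [show pvStepA (seen, dup, miss, corr) kv = (seen, dup ++ [kv], miss, corr ++ [kv]) from by
              simp [pvStepA, hk, hs', hv], ih (pre ++ [kv]) _ _ _ _ hinv]
          simp [pvDupRef, hk, hv, hmem]
        · rw [show pvStepA (seen, dup, miss, corr) kv = (seen, dup ++ [kv], miss, corr) from by
              simp [pvStepA, hk, hs', hv], ih (pre ++ [kv]) _ _ _ _ hinv]
          simp [pvDupRef, hk, hv, hmem]
      · have hs' : kv.1 ∉ seen := fun h => hs ((PySem.Set.contains_iff _ _).2 h)
        have hmem : kv.1 ∉ pre.map Prod.fst := fun h => hs ((hseen kv.1 hk).2 h)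
        have hinv : ∀ k, k ≠ "" → ((seen.add kv.1).contains k = true ↔ k ∈ (pre ++ [kv]).map Prod.fst) := by
          intro k hk'
          rw [PySem.Set.contains_iff, PySem.Set.mem_add]
          simp only [List.map_append, List.mem_append, List.map_cons, List.map_nil,
            List.mem_singleton]
          rw [← hseen k hk', PySem.Set.contains_iff]
        by_cases hv : (kv.2 = none ∨ kv.2 = some "")
        · rw [show pvStepA (seen, dup, miss, corr) kv = (seen.add kv.1, dup, miss, corr ++ [kv]) from by
              simp [pvStepA, hk, hs', hv], ih (pre ++ [kv]) _ _ _ _ hinv]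
          simp [pvDupRef, hk, hv, hmem]
        · rw [show pvStepA (seen, dup, miss, corr) kv = (seen.add kv.1, dup, miss, corr) from by
              simp [pvStepA, hk, hs', hv], ih (pre ++ [kv]) _ _ _ _ hinv]
          simp [pvDupRef, hk, hv, hmem]

-- the reversed-fold dict holds, for every truthy key, the index of its FIRST occurrence
theorem pvFirstOcc_get? (l : List (String × Option String)) :
    ∀ (s : Int) (d : PySem.Dict String Int) (k : String), k ≠ "" →
      ((PySem.List.enumerate l s).reverse.foldl
          (fun d p => if p.2.1 = "" then d else d.insert p.2.1 p.1) d).get? k =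
        (match l.findIdx? (fun kv => kv.1 == k) with
         | some j => some (s + (j : Int))
         | none => d.get? k) := by
  induction l with
  | nil => intro s d k hk; simp [PySem.List.enumerate]
  | cons kv rest ih =>
    intro s d k hk
    rw [PySem.List.enumerate_cons, List.reverse_cons, List.foldl_append]
    simp only [List.foldl_cons, List.foldl_nil]
    rw [List.findIdx?_cons]
    by_cases hkk : kv.1 = k
    · rw [if_neg (by rw [hkk]; exact hk), hkk, PySem.Dict.get?_insert_self]
      simp
    · have hbeq : (kv.1 == k) = false := by simp [hkk]
      by_cases hk1 : kv.1 = ""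
      · rw [if_pos hk1, ih (s + 1) d k hk]
        simp only [hbeq]
        cases h : rest.findIdx? (fun kv => kv.1 == k) with
        | none => simp
        | some j => simp; omega
      · rw [if_neg hk1,
          PySem.Dict.get?_insert_of_ne _ _ (show k ≠ kv.1 from fun h => hkk h.symm),
          ih (s + 1) d k hk]
        simp only [hbeq]
        cases h : rest.findIdx? (fun kv => kv.1 == k) with
        | none => simp
        | some j => simp; omega

-- B's positional filter over enumerate equals pvDupRef
theorem pvB_dup_ref (rest : List (String × Option String)) :
    ∀ (pre full : List (String × Option String)),
      full = pre ++ rest →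
      ((PySem.List.enumerate rest (pre.length : Int)).filter
          (fun p => p.2.1 ≠ "" ∧ (pvFirstOcc (PySem.List.enumerate full 0)).getD p.2.1 (-1) ≠ p.1)).map (·.2)
        = pvDupRef pre rest := by
  induction rest with
  | nil => intro pre full _; simp [PySem.List.enumerate, pvDupRef]
  | cons kv rest ih =>
    intro pre full hfull
    rw [PySem.List.enumerate_cons]
    have hstep := ih (pre ++ [kv]) full (by simp [hfull])
    have hlen : ((pre ++ [kv]).length : Int) = (pre.length : Int) + 1 := by simp
    rw [hlen] at hstep
    by_cases hk : kv.1 = ""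
    · have hcond : (decide (kv.1 ≠ "" ∧ (pvFirstOcc (PySem.List.enumerate full 0)).getD kv.1 (-1) ≠ ((pre.length : Int)))) = false := by
        simp [hk]
      simp only [List.filter_cons, hcond, Bool.false_eq_true, if_false]
      rw [hstep]
      simp [pvDupRef, hk]
    · -- the key is truthy: the dict lookup decides prefix membership
      have hget := pvFirstOcc_get? full 0 PySem.Dict.empty kv.1 hk
      have hgetD : (pvFirstOcc (PySem.List.enumerate full 0)).getD kv.1 (-1)
          = (match full.findIdx? (fun p => p.1 == kv.1) with
             | some j => (j : Int)
             | none => (-1 : Int)) := by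
        rw [PySem.Dict.getD_eq_get?_getD, pvFirstOcc, hget]
        cases h : full.findIdx? (fun p => p.1 == kv.1) <;> simp [PySem.Dict.get?_empty]
      have hmem_iff : ((pvFirstOcc (PySem.List.enumerate full 0)).getD kv.1 (-1) ≠ (pre.length : Int))
          ↔ kv.1 ∈ pre.map Prod.fst := by
        rw [hgetD]
        by_cases hmem : kv.1 ∈ pre.map Prod.fst
        · -- some earlier element of pre has this key: findIdx? finds an index < pre.length
          obtain ⟨q, hq, hqk⟩ := List.mem_map.1 hmem
          have hsome : ∃ j0, pre.findIdx? (fun p => p.1 == kv.1) = some j0 := by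
            cases h : pre.findIdx? (fun p => p.1 == kv.1) with
            | some j0 => exact ⟨j0, rfl⟩
            | none =>
              rw [List.findIdx?_eq_none_iff] at h
              have := h q hq
              simp [hqk] at this
          obtain ⟨j0, hj0⟩ := hsome
          have hj0lt : j0 < pre.length := (List.findIdx?_eq_some_iff_findIdx_eq.1 hj0).1
          have hfi : full.findIdx? (fun p => p.1 == kv.1) = some j0 := by
            rw [hfull, List.findIdx?_append, hj0]
            rfl
          rw [hfi]
          simp only [ne_eq]
          constructor
          · intro _; exact hmem
          · intro _; omega
        · -- no earlier occurrence: the first occurrence is this very index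
          have hnone : pre.findIdx? (fun p => p.1 == kv.1) = none := by
            rw [List.findIdx?_eq_none_iff]
            intro q hq
            simp only [beq_eq_false_iff_ne, ne_eq]
            intro hqk
            exact hmem (List.mem_map.2 ⟨q, hq, hqk⟩)
          have hfi : full.findIdx? (fun p => p.1 == kv.1) = some pre.length := by
            rw [hfull, List.findIdx?_append, hnone]
            simp [List.findIdx?_cons]
          rw [hfi]
          simp [hmem]
      by_cases hmem : kv.1 ∈ pre.map Prod.fst
      · have hcond : (decide (kv.1 ≠ "" ∧ (pvFirstOcc (PySem.List.enumerate full 0)).getD kv.1 (-1) ≠ ((pre.length : Int)))) = true := by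
          simp only [decide_eq_true_eq]
          exact ⟨hk, hmem_iff.2 hmem⟩
        simp only [List.filter_cons, hcond, if_true, List.map_cons]
        rw [hstep]
        simp [pvDupRef, hk, hmem]
      · have hcond : (decide (kv.1 ≠ "" ∧ (pvFirstOcc (PySem.List.enumerate full 0)).getD kv.1 (-1) ≠ ((pre.length : Int)))) = false := by
          simp only [decide_eq_false_iff_not]
          intro h
          exact hmem (hmem_iff.1 h.2)
        simp only [List.filter_cons, hcond, Bool.false_eq_true, if_false]
        rw [hstep]
        simp [pvDupRef, hk, hmem]

-- ===== VERDICT =====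
theorem check_consistency_q15_spec : Claim_equal_check_consistency_q15 := by
  intro data _
  show check_consistency_q15 data = check_consistency_q15_alt data
  rw [check_consistency_q15, check_consistency_q15_alt]
  rw [pvA_dup_ref data [] (PySem.Set.ofList []) [] [] [] (by simp)]
  have hb := pvB_dup_ref data [] data (by simp)
  simp only [List.length_nil, Nat.cast_zero] at hb
  simp at hb
  simp [hb]
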